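-- pv_equiv track=rewrite | github.com/fatemzahrae/Codeforces-submissions | 1943B.py | calcul_f
-- ===== SOURCE A (Python) =====
-- def Palindrome(pal):
--     return pal == pal[::-1]
--
-- def calcul_f(t):
--     sum_of_lengths = 0
--     lengths = set()
--     for i in range(len(t)-1):
--         for j in range(i+2, len(t)+1):
--             substring = t[i:j]
--             if not Palindrome(substring) :
--                 if len(substring) not in lengths:
--                     sum_of_lengths += len(substring)
--                     lengths.add(len(substring))
--     return sum_of_lengths
-- ===== SOURCE B (Python) =====
-- def calcul_f(t):
--     n = len(t)
--     total = 0
--     prev2 = [True] * (n + 1)   # palindromicity of windows of length L-2, by start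
--     prev1 = [True] * n
--     for L in range(2, n + 1):
--         cur = [t[i] == t[i + L - 1] and prev2[i + 1] for i in range(n - L + 1)]
--         if not all(cur):
--             total += L
--         prev2 = prev1
--         prev1 = cur
--     return total
-- ===== Notes on version B (the rewrite author's own statement) =====
-- stated objective: faster
-- what changed: Replaces the O(n^3) pair-major scan with a dedup set by an O(n^2) length-major dynamic programme: two rolling rows of window-palindromicity (pal(i,L) = t[i]==t[i+L-1] and pal(i+1,L-2)), summing each length whose row has a False entry; the set and the per-substring slicing disappear.
import Mathlib
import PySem

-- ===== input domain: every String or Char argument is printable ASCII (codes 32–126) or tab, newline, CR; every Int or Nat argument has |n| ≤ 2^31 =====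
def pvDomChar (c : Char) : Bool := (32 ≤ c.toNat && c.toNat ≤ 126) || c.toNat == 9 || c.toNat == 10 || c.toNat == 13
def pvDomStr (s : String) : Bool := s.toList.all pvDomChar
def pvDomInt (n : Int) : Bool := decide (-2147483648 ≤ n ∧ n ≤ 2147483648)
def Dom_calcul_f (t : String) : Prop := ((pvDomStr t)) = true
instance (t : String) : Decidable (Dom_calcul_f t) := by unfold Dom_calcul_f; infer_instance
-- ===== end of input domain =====

-- B replaces A's pair-major nested scan with dedup set by a length-major loop whose
-- per-length existence check (any) short-circuits at the first non-palindromic window.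

-- ===== PORT A =====
def Palindrome (pal : List Char) : Bool :=
  pal == (PySem.List.slice? pal none none (-1)).getD []

def calcul_f (t : String) : Int :=
  let tl := t.toList
  let n : Int := PySem.Str.len t
  ((PySem.List.pyRange 0 (n - 1) 1).foldl (fun (st : Int × PySem.Set Int) i =>
      (PySem.List.pyRange (i + 2) (n + 1) 1).foldl (fun st j =>
        let substring := PySem.List.slice tl (some i) (some j)
        if !(Palindrome substring) then
          if !(PySem.Set.contains st.2 (PySem.List.len substring)) then
            (st.1 + PySem.List.len substring, PySem.Set.add st.2 (PySem.List.len substring))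
          else st
        else st) st) ((0 : Int), (PySem.Set.empty : PySem.Set Int))).1

-- ===== PORT B =====
def calcul_f_alt (t : String) : Int :=
  let tl := t.toList
  let n : Int := PySem.Str.len t
  ((PySem.List.pyRange 2 (n + 1) 1).foldl
    (fun (st : Int × List Bool × List Bool) L =>
      let cur := (PySem.List.pyRange 0 (n - L + 1) 1).map (fun i =>
        (PySem.List.pyGetD tl i ' ' == PySem.List.pyGetD tl (i + L - 1) ' ') &&
        PySem.List.pyGetD st.2.1 (i + 1) true)
      (if !(cur.all (fun b => b)) then st.1 + L else st.1, st.2.2, cur))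
    (0, List.replicate (n + 1).toNat true, List.replicate n.toNat true)).1

-- ===== PRECONDITION & SPEC =====
def Spec_calcul_f (t : String) (out : Int) : Prop := out = calcul_f_alt t
instance (t : String) (out : Int) : Decidable (Spec_calcul_f t out) := by unfold Spec_calcul_f; infer_instance

-- ===== CLAIM (what is proved, stated in full; the proofs are below) =====
def Claim_equal_calcul_f : Prop := ∀ (t : String), Dom_calcul_f t → Spec_calcul_f t (calcul_f t)

-- ===== LEMMAS AND PROOFS =====

-- "substring t[i:j] is not a palindrome", as both ports compute it
def npB (cs : List Char) (i j : Int) : Bool :=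
  !(PySem.List.slice cs (some i) (some j) == (PySem.List.slice cs (some i) (some j)).reverse)

def lenIJ (cs : List Char) (i j : Int) : Int :=
  PySem.List.len (PySem.List.slice cs (some i) (some j))

-- A's per-candidate step, on the candidate's length alone
def stepL (st : Int × PySem.Set Int) (L : Int) : Int × PySem.Set Int :=
  if !(PySem.Set.contains st.2 L) then (st.1 + L, PySem.Set.add st.2 L) else st

-- lengths of the non-palindromic substrings A's inner loop meets, in order
def badOf (cs : List Char) (i : Int) (js : List Int) : List Int :=
  js.filterMap (fun j => if npB cs i j then some (lenIJ cs i j) else none)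

def badAll (cs : List Char) (n : Int) (is : List Int) : List Int :=
  is.flatMap (fun i => badOf cs i (PySem.List.pyRange (i + 2) (n + 1) 1))

theorem Palindrome_eq (pal : List Char) : Palindrome pal = (pal == pal.reverse) := by
  simp [Palindrome, PySem.List.slice?_none_none_neg_one]

theorem inner_fold_eq (cs : List Char) (i : Int) (js : List Int) (st : Int × PySem.Set Int) :
    js.foldl (fun st j =>
        let substring := PySem.List.slice cs (some i) (some j)
        if !(Palindrome substring) then
          if !(PySem.Set.contains st.2 (PySem.List.len substring)) then
            (st.1 + PySem.List.len substring, PySem.Set.add st.2 (PySem.List.len substring))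
          else st
        else st) st
      = (badOf cs i js).foldl stepL st := by
  induction js generalizing st with
  | nil => rfl
  | cons j js ih =>
    simp only [List.foldl_cons]
    rw [ih]
    by_cases h : npB cs i j
    · have hb : badOf cs i (j :: js) = lenIJ cs i j :: badOf cs i js := by
        simp [badOf, h]
      rw [hb, List.foldl_cons]
      congr 1
      simp only [npB, Bool.not_eq_eq_eq_not, Bool.not_true, beq_eq_false_iff_ne,
        ne_eq] at h
      simp [stepL, lenIJ, Palindrome_eq, h]
    · have hb : badOf cs i (j :: js) = badOf cs i js := by
        simp [badOf, h]
      rw [hb]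
      congr 1
      simp only [npB, Bool.not_eq_true'] at h
      simp [Palindrome_eq, h]

theorem outer_fold_eq (cs : List Char) (n : Int) (is : List Int) (st : Int × PySem.Set Int) :
    is.foldl (fun st i =>
        (PySem.List.pyRange (i + 2) (n + 1) 1).foldl (fun st j =>
          let substring := PySem.List.slice cs (some i) (some j)
          if !(Palindrome substring) then
            if !(PySem.Set.contains st.2 (PySem.List.len substring)) then
              (st.1 + PySem.List.len substring, PySem.Set.add st.2 (PySem.List.len substring))
            else st
          else st) st) st
      = (badAll cs n is).foldl stepL st := by
  induction is generalizing st with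
  | nil => rfl
  | cons i is ih =>
    simp only [List.foldl_cons, badAll, List.flatMap_cons, List.foldl_append]
    rw [inner_fold_eq, ih]
    rfl

theorem stepL_snd (ls : List Int) (st : Int × PySem.Set Int) :
    (ls.foldl stepL st).2 = ls.foldl PySem.Set.add st.2 := by
  induction ls generalizing st with
  | nil => rfl
  | cons l ls ih =>
    simp only [List.foldl_cons]
    rw [ih]
    congr 1
    by_cases h : l ∈ st.2
    · simp [stepL, PySem.Set.add, h]
    · simp [stepL, PySem.Set.add, h]

theorem stepL_inv (ls : List Int) (st : Int × PySem.Set Int) :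
    (ls.foldl stepL st).1 + (st.2 : List Int).sum
      = st.1 + ((ls.foldl stepL st).2 : List Int).sum := by
  induction ls generalizing st with
  | nil => rfl
  | cons l ls ih =>
    simp only [List.foldl_cons]
    have h1 := ih (stepL st l)
    have key : (stepL st l).1 + (st.2 : List Int).sum
        = st.1 + ((stepL st l).2 : List Int).sum := by
      by_cases h : l ∈ st.2
      · simp [stepL, h]
      · simp [stepL, PySem.Set.add, h]
        ring
    omega

theorem clamp_eq (n : Nat) (k : Int) (h0 : 0 ≤ k) (h1 : k ≤ (n : Int)) :
    (PySem.List.clampIdx n k : Int) = k := by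
  simp only [PySem.List.clampIdx]
  split_ifs with h2 <;> omega

theorem lenIJ_eq (cs : List Char) (i j : Int) (h0 : 0 ≤ i) (h1 : i ≤ j)
    (h2 : j ≤ (cs.length : Int)) : lenIJ cs i j = j - i := by
  simp only [lenIJ, PySem.List.len, PySem.List.length_slice]
  have a1 := clamp_eq cs.length i h0 (le_trans h1 h2)
  have a2 := clamp_eq cs.length j (le_trans h0 h1) h2
  have hle : PySem.List.clampIdx cs.length i ≤ PySem.List.clampIdx cs.length j := by omega
  omega

-- the membership equivalence between A's traversal and B's per-length windows
theorem mem_badAll_iff (cs : List Char) (L : Int) :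
    L ∈ badAll cs (cs.length : Int) (PySem.List.pyRange 0 ((cs.length : Int) - 1) 1)
      ↔ (L ∈ PySem.List.pyRange 2 ((cs.length : Int) + 1) 1 ∧
         (PySem.List.pyRange 0 ((cs.length : Int) - L + 1) 1).any
           (fun i => npB cs i (i + L)) = true) := by
  constructor
  · rintro h
    simp only [badAll, List.mem_flatMap, badOf, List.mem_filterMap] at h
    obtain ⟨i, hi, j, hj, hLj⟩ := h
    rw [PySem.List.mem_pyRange_one] at hi hj
    have hnp : npB cs i j := by
      by_contra hc
      simp [hc] at hLj
    simp only [hnp, if_pos, Option.some.injEq] at hLj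
    have hlen : L = j - i := by
      rw [← hLj]
      exact lenIJ_eq cs i j (by omega) (by omega) (by omega)
    constructor
    · rw [PySem.List.mem_pyRange_one]; omega
    · rw [List.any_eq_true]
      refine ⟨i, ?_, ?_⟩
      · rw [PySem.List.mem_pyRange_one]; omega
      · have : i + L = j := by omega
        rw [this]; exact hnp
  · rintro ⟨hL, hany⟩
    rw [PySem.List.mem_pyRange_one] at hL
    rw [List.any_eq_true] at hany
    obtain ⟨i, hi, hnp⟩ := hany
    rw [PySem.List.mem_pyRange_one] at hi
    simp only [badAll, List.mem_flatMap, badOf, List.mem_filterMap]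
    refine ⟨i, ?_, i + L, ?_, ?_⟩
    · rw [PySem.List.mem_pyRange_one]; omega
    · rw [PySem.List.mem_pyRange_one]; omega
    · simp only [hnp, if_pos, Option.some.injEq]
      rw [lenIJ_eq cs i (i + L) (by omega) (by omega) (by omega)]
      omega

-- B-side: the ideal palindromicity row for window length L
def rowIdeal (cs : List Char) (L : Int) : List Bool :=
  (PySem.List.pyRange 0 ((cs.length : Int) - L + 1) 1).map (fun i =>
    decide (PySem.List.slice cs (some i) (some (i + L))
      = (PySem.List.slice cs (some i) (some (i + L))).reverse))

theorem rev_short (l : List Char) (h : l.length ≤ 1) : l.reverse = l := by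
  match l with
  | [] => rfl
  | [x] => rfl
  | x :: y :: _ => simp at h

theorem pal_cons_append (x z : Char) (ys : List Char) :
    (x :: (ys ++ [z]) = (x :: (ys ++ [z])).reverse) ↔ (x = z ∧ ys = ys.reverse) := by
  simp only [List.reverse_cons, List.reverse_append, List.reverse_cons, List.reverse_nil,
    List.nil_append, List.cons_append, List.cons.injEq]
  constructor
  · rintro ⟨hx, hy⟩
    subst hx
    exact ⟨rfl, by
      have := List.append_inj_left' hy (by rfl)
      exact this⟩
  · rintro ⟨hx, hy⟩
    subst hx
    exact ⟨rfl, by rw [← hy]⟩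

theorem window_decomp (cs : List Char) (i L : Nat) (h2 : 2 ≤ L) (hle : i + L ≤ cs.length) :
    (cs.drop i).take L
      = cs[i]'(by omega) :: ((cs.drop (i + 1)).take (L - 2) ++ [cs[i + L - 1]'(by omega)]) := by
  have hdrop : cs.drop i = cs[i]'(by omega) :: cs.drop (i + 1) := by
    rw [List.drop_eq_getElem_cons (by omega)]
  rw [hdrop]
  have hL : L = (L - 1) + 1 := by omega
  rw [List.take_cons (by omega)]
  congr 1
  have h1 : L - 1 = (L - 2) + 1 := by omega
  rw [h1, List.take_add_one]
  congr 1
  have hidx : (i + 1) + (L - 2) = i + L - 1 := by omega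
  have : (cs.drop (i + 1))[L - 2]? = some (cs[i + L - 1]'(by omega)) := by
    rw [List.getElem?_drop, hidx, List.getElem?_eq_getElem (by omega)]
  rw [this]
  rfl

theorem pal_step (cs : List Char) (i L : Nat) (h2 : 2 ≤ L) (hle : i + L ≤ cs.length) :
    ((cs.drop i).take L = ((cs.drop i).take L).reverse
      ↔ (cs[i]'(by omega) = cs[i + L - 1]'(by omega)
          ∧ (cs.drop (i + 1)).take (L - 2) = ((cs.drop (i + 1)).take (L - 2)).reverse)) := by
  rw [window_decomp cs i L h2 hle]
  exact pal_cons_append _ _ _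

theorem slice_window (cs : List Char) (i L : Int) (h0 : 0 ≤ i) (h1 : 0 ≤ L) :
    PySem.List.slice cs (some i) (some (i + L)) = (cs.drop i.toNat).take L.toNat := by
  rw [PySem.List.slice_toNat cs h0 (by omega)]
  congr 1
  omega

theorem row_zero (cs : List Char) :
    rowIdeal cs 0 = List.replicate ((cs.length : Int) + 1).toNat true := by
  rw [List.eq_replicate_iff]
  constructor
  · simp [rowIdeal, PySem.List.length_pyRange_one]
  · intro b hb
    simp only [rowIdeal, List.mem_map] at hb
    obtain ⟨i, hi, hbe⟩ := hb
    rw [PySem.List.mem_pyRange_one] at hi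
    rw [slice_window cs i 0 (by omega) (by omega)] at hbe
    simp at hbe
    omega

theorem row_one (cs : List Char) :
    rowIdeal cs 1 = List.replicate ((cs.length : Int)).toNat true := by
  rw [List.eq_replicate_iff]
  constructor
  · simp [rowIdeal, PySem.List.length_pyRange_one]
  · intro b hb
    simp only [rowIdeal, List.mem_map] at hb
    obtain ⟨i, hi, hbe⟩ := hb
    rw [PySem.List.mem_pyRange_one] at hi
    rw [slice_window cs i 1 (by omega) (by omega)] at hbe
    rw [← hbe, decide_eq_true_eq]
    exact (rev_short _ (by simp)).symm

theorem row_step (cs : List Char) (a : Int) (h2 : 2 ≤ a) :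
    (PySem.List.pyRange 0 ((cs.length : Int) - a + 1) 1).map (fun i =>
        (PySem.List.pyGetD cs i ' ' == PySem.List.pyGetD cs (i + a - 1) ' ') &&
        PySem.List.pyGetD (rowIdeal cs (a - 2)) (i + 1) true)
      = rowIdeal cs a := by
  unfold rowIdeal
  apply List.map_congr_left
  intro i hi
  rw [PySem.List.mem_pyRange_one] at hi
  obtain ⟨hi0, hi1⟩ := hi
  have hn : i + a ≤ (cs.length : Int) := by omega
  -- the three indexings
  rw [PySem.List.pyGetD_eq_getElem cs ' ' hi0 (by omega)]
  rw [PySem.List.pyGetD_eq_getElem (i := i + a - 1) cs ' ' (by omega) (by omega)]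
  rw [PySem.List.pyGetD_map_pyRange_of_nonneg _ _ _ _ (by omega) (by omega)]
  -- turn slices into windows
  rw [slice_window cs i a hi0 (by omega), slice_window cs (i + 1) (a - 2) (by omega) (by omega)]
  -- indices as naturals
  have hstep := pal_step cs i.toNat a.toNat (by omega) (by omega)
  rw [Bool.eq_iff_iff]
  simp only [Bool.and_eq_true, beq_iff_eq, decide_eq_true_eq]
  have e1 : (i + a - 1).toNat = i.toNat + a.toNat - 1 := by omega
  have e2 : (i + 1).toNat = i.toNat + 1 := by omega
  have e3 : (a - 2).toNat = a.toNat - 2 := by omega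
  simp only [e1, e2, e3]
  exact hstep.symm

theorem B_loop (cs : List Char) (k : Nat) : ∀ (a total : Int), 2 ≤ a →
    (((cs.length : Int) + 1 - a).toNat = k) →
    ((PySem.List.pyRange a ((cs.length : Int) + 1) 1).foldl
      (fun (st : Int × List Bool × List Bool) L =>
        let cur := (PySem.List.pyRange 0 ((cs.length : Int) - L + 1) 1).map (fun i =>
          (PySem.List.pyGetD cs i ' ' == PySem.List.pyGetD cs (i + L - 1) ' ') &&
          PySem.List.pyGetD st.2.1 (i + 1) true)
        (if !(cur.all (fun b => b)) then st.1 + L else st.1, st.2.2, cur))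
      (total, rowIdeal cs (a - 2), rowIdeal cs (a - 1))).1
    = total + ((PySem.List.pyRange a ((cs.length : Int) + 1) 1).filter
        (fun L => !((rowIdeal cs L).all (fun b => b)))).sum := by
  induction k with
  | zero =>
    intro a total h2 hk
    rw [PySem.List.pyRange_one_eq_nil (by omega)]
    simp
  | succ k ih =>
    intro a total h2 hk
    have ha : a ≤ (cs.length : Int) := by omega
    rw [PySem.List.pyRange_one_cons (by omega)]
    simp only [List.foldl_cons, List.filter_cons]
    rw [row_step cs a h2]
    have h1 : rowIdeal cs (a - 1) = rowIdeal cs (a + 1 - 2) := by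
      congr 1
      ring
    have h2' : rowIdeal cs a = rowIdeal cs (a + 1 - 1) := by
      congr 1
      ring
    by_cases hc : !((rowIdeal cs a).all (fun b => b))
    · simp only [hc, if_pos]
      rw [h1, h2', ih (a + 1) (total + a) (by omega) (by omega)]
      simp [List.sum_cons]
      ring
    · simp only [Bool.not_eq_true] at hc
      rw [if_neg (by simp [hc])]
      rw [h1, h2', ih (a + 1) total (by omega) (by omega)]
      simp [hc]

-- the per-length condition of B coincides with the window-existence test
theorem cond_eq (cs : List Char) (L : Int) :
    (!((rowIdeal cs L).all (fun b => b)))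
      = (PySem.List.pyRange 0 ((cs.length : Int) - L + 1) 1).any (fun i => npB cs i (i + L)) := by
  rw [Bool.eq_iff_iff]
  simp only [Bool.not_eq_eq_eq_not, Bool.not_true, List.all_eq_false, rowIdeal, List.mem_map,
    List.any_eq_true, npB]
  constructor
  · rintro ⟨b, ⟨i, hi, hbe⟩, hb⟩
    refine ⟨i, hi, ?_⟩
    rw [← hbe] at hb
    simp at hb ⊢
    exact hb
  · rintro ⟨i, hi, hb⟩
    refine ⟨false, ⟨i, hi, ?_⟩, by simp⟩
    simp at hb ⊢
    exact hb

-- ===== VERDICT (by name: the statement is the Claim_ definition above) =====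
theorem calcul_f_spec : Claim_equal_calcul_f := by
  intro t _
  unfold Spec_calcul_f calcul_f calcul_f_alt
  set cs := t.toList with hcs
  simp only [PySem.Str.len_eq, hcs]
  set n : Int := (cs.length : Int) with hn
  rw [outer_fold_eq cs n (PySem.List.pyRange 0 (n - 1) 1) (0, PySem.Set.empty)]
  -- A side: sum of the deduped bad lengths
  have hA : ((badAll cs n (PySem.List.pyRange 0 (n - 1) 1)).foldl stepL
      ((0 : Int), (PySem.Set.empty : PySem.Set Int))).1
      = (PySem.Set.ofList (badAll cs n (PySem.List.pyRange 0 (n - 1) 1)) : List Int).sum := by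
    have := stepL_inv (badAll cs n (PySem.List.pyRange 0 (n - 1) 1))
      ((0 : Int), (PySem.Set.empty : PySem.Set Int))
    rw [stepL_snd] at this
    simpa [PySem.Set.empty, PySem.Set.ofList_eq_foldl] using this
  rw [hA]
  -- B side: the rolling-row loop computes the filtered length sum
  have hrows : ((0 : Int), List.replicate (n + 1).toNat true, List.replicate n.toNat true)
      = ((0 : Int), rowIdeal cs ((2 : Int) - 2), rowIdeal cs ((2 : Int) - 1)) := by
    rw [show ((2 : Int) - 2) = 0 from rfl, show ((2 : Int) - 1) = 1 from rfl,
      row_zero, row_one]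
  rw [hrows, B_loop cs ((n + 1 - 2).toNat) 2 0 (by omega) rfl]
  simp only [zero_add]
  -- the two nodup lists have the same members, hence equal sums
  apply List.Perm.sum_eq
  rw [List.perm_ext_iff_of_nodup (PySem.Set.nodup_ofList _)
    ((PySem.List.nodup_pyRange_one 2 (n + 1)).filter _)]
  intro L
  rw [PySem.Set.mem_ofList, List.mem_filter, cond_eq, hn, mem_badAll_iff]
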